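-- pv_equiv track=rewrite | github.com/asmamousa/DS-and-Algo-Nanodegree | Third Project/problem_3.py | get_two_max_sums
-- ===== SOURCE A (Python) =====
-- def get_two_max_sums(sorted_list):
--
--     # Extract the number of digits for each number
--     num_of_digits_for_first_num = len(sorted_list)//2
--     num_of_digits_for_second_num = len(sorted_list) - num_of_digits_for_first_num
--
--     num_one = num_two = 0
--     end_index = len(sorted_list)-1
--
--     # the keys are 1, -1 in order to switch between them after each itertion
--     # in the while loop
--     target_number = {1: num_one,
--                   -1: num_two
--                   }
--
--     target_num_of_digits = {1: num_of_digits_for_first_num,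
--                             -1: num_of_digits_for_second_num
--                             }
--
--     # Start with index -1 since it's represents the key for num_two in both dict
--     index = -1
--     while end_index >= 0:
--         num = sorted_list[end_index]
--         target_number[index] += num * (pow(10, target_num_of_digits[index]-1))
--         target_num_of_digits[index] -= 1
--         end_index -= 1
--
--         # switch to another num key. If the current iteration is performed on num_two
--         # then the next will be on num_one and vise verca
--         index *= -1
--
--     return target_number[1], target_number[-1]
-- ===== SOURCE B (Python) =====
-- def get_two_max_sums(sorted_list):
--     # One forward pass splits the digits into the two numbers' digit lists
--     # (most significant digit first), then each number is built by Horner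
--     # accumulation.  No dicts, no pow, no index arithmetic.
--     high, low = [], []
--     for d in sorted_list:
--         high, low = [d] + low, high
--     num_one = 0
--     for d in low:
--         num_one = num_one * 10 + d
--     num_two = 0
--     for d in high:
--         num_two = num_two * 10 + d
--     return num_one, num_two
-- ===== Notes on version B (the rewrite author's own statement) =====
-- stated objective: simpler
-- what changed: Replaces A's single backward alternating loop with its 1/-1-keyed dicts, explicit digit-count bookkeeping and pow(10, k) place values by a forward pass that splits the elements into the two numbers' digit lists and two plain Horner accumulation loops.
import Mathlib
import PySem

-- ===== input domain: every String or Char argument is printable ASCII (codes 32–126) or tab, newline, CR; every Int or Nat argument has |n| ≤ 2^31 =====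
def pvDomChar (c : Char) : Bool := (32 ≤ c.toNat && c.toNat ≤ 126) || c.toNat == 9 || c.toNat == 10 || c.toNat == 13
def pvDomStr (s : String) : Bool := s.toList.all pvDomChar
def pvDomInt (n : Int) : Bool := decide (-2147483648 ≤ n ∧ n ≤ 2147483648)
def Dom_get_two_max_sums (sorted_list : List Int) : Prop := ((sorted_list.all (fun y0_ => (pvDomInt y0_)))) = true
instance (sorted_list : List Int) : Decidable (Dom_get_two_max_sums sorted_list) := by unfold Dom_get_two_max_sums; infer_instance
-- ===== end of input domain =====

-- B replaces A's alternating dict/pow loop by a forward split into the two digit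
-- lists followed by two Horner accumulations (objective: simpler).

-- ===== PORT A =====
-- A's while loop over end_index = fuel-1 down to 0; state = the two dicts and the
-- alternating key `index`.  pow(10, d-1): on every reachable state d ≥ 1, so the
-- `.toNat` on the exponent is exact (proved in the lemmas below).
def pvLoopA (sorted_list : List Int) :
    Nat → PySem.Dict Int Int → PySem.Dict Int Int → Int → PySem.Dict Int Int
  | 0, target_number, _, _ => target_number
  | e + 1, target_number, target_num_of_digits, index =>
      let num := PySem.List.pyGetD sorted_list (e : Int) 0   -- sorted_list[end_index]; always in range here
      let target_number' := target_number.modify index 0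
        (fun cur => cur + num * 10 ^ ((target_num_of_digits.getD index 0) - 1).toNat)
      let target_num_of_digits' := target_num_of_digits.modify index 0 (fun cur => cur - 1)
      pvLoopA sorted_list e target_number' target_num_of_digits' (index * (-1))

def get_two_max_sums (sorted_list : List Int) : Int × Int :=
  let num_of_digits_for_first_num : Int := PySem.Int.floordiv (PySem.List.len sorted_list) 2
  let num_of_digits_for_second_num : Int := PySem.List.len sorted_list - num_of_digits_for_first_num
  let target_number : PySem.Dict Int Int := (PySem.Dict.empty.insert 1 0).insert (-1) 0
  let target_num_of_digits : PySem.Dict Int Int :=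
    (PySem.Dict.empty.insert 1 num_of_digits_for_first_num).insert (-1) num_of_digits_for_second_num
  let final := pvLoopA sorted_list sorted_list.length target_number target_num_of_digits (-1)
  (final.getD 1 0, final.getD (-1) 0)

-- ===== PORT B =====
def pvHorner (acc : Int) : List Int → Int
  | [] => acc
  | d :: ds => pvHorner (acc * 10 + d) ds

def get_two_max_sums_alt (sorted_list : List Int) : Int × Int :=
  let hl := sorted_list.foldl (fun (st : List Int × List Int) d => (d :: st.2, st.1)) ([], [])
  (pvHorner 0 hl.2, pvHorner 0 hl.1)

-- ===== PRECONDITION & SPEC =====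
def Spec_get_two_max_sums (sorted_list : List Int) (out : Int × Int) : Prop := out = get_two_max_sums_alt sorted_list
instance (sorted_list : List Int) (out : Int × Int) : Decidable (Spec_get_two_max_sums sorted_list out) := by unfold Spec_get_two_max_sums; infer_instance

-- ===== CLAIM (what is proved, stated in full; the proofs are below) =====
def Claim_equal_get_two_max_sums : Prop := ∀ (sorted_list : List Int), Dom_get_two_max_sums sorted_list → Spec_get_two_max_sums sorted_list (get_two_max_sums sorted_list)

-- ===== LEMMAS AND PROOFS =====

mutual
  def pvEvens : List Int → List Int
    | [] => []
    | x :: r => x :: pvOdds r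
  def pvOdds : List Int → List Int
    | [] => []
    | _ :: r => pvEvens r
end

-- A's loop rephrased as structural recursion over the reversed list (proof helper).
def pvLoopR : List Int → PySem.Dict Int Int → PySem.Dict Int Int → Int → PySem.Dict Int Int
  | [], tn, _, _ => tn
  | x :: r, tn, td, idx =>
      pvLoopR r (tn.modify idx 0 (fun cur => cur + x * 10 ^ ((td.getD idx 0) - 1).toNat))
        (td.modify idx 0 (fun cur => cur - 1)) (idx * (-1))

def pvD2 (a b : Int) : PySem.Dict Int Int := (PySem.Dict.empty.insert 1 a).insert (-1) b

lemma pvModify_neg (a b v : Int) (f : Int → Int) :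
    (pvD2 a b).modify (-1) v f = pvD2 a (f b) := by
  rfl

lemma pvModify_pos (a b v : Int) (f : Int → Int) :
    (pvD2 a b).modify 1 v f = pvD2 (f a) b := by
  rfl

lemma pvGetD_pos (a b v : Int) : (pvD2 a b).getD 1 v = a := by rfl
lemma pvGetD_neg (a b v : Int) : (pvD2 a b).getD (-1) v = b := by rfl

lemma pvLoopA_eq_loopR (lst : List Int) (k : Nat) (hk : k ≤ lst.length)
    (tn td : PySem.Dict Int Int) (idx : Int) :
    pvLoopA lst k tn td idx = pvLoopR ((lst.take k).reverse) tn td idx := by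
  induction k generalizing tn td idx with
  | zero => simp [pvLoopA, pvLoopR]
  | succ k ih =>
    have hk' : k < lst.length := by omega
    rw [List.take_add_one]
    simp only [List.getElem?_eq_getElem hk', Option.toList_some, List.reverse_append,
      List.reverse_cons, List.reverse_nil, List.nil_append, List.singleton_append]
    rw [pvLoopA, pvLoopR]
    simp only [PySem.List.pyGetD_natCast, List.getD_eq_getElem _ _ hk']
    exact ih (by omega) _ _ _

lemma pvHorner_shift (s : List Int) (a : Int) :
    pvHorner a s = a * 10 ^ s.length + pvHorner 0 s := by
  induction s generalizing a with
  | nil => simp [pvHorner]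
  | cons d s ih =>
    simp only [pvHorner, List.length_cons]
    rw [ih, ih (0 * 10 + d)]
    ring

lemma pvEvensOdds_length (l : List Int) :
    (pvEvens l).length = (l.length + 1) / 2 ∧ (pvOdds l).length = l.length / 2 := by
  induction l with
  | nil => simp [pvEvens, pvOdds]
  | cons x r ih =>
    constructor
    · simp only [pvEvens, List.length_cons, ih.2]
      omega
    · simp only [pvOdds, List.length_cons, ih.1]

lemma pvLoopR_key (r : List Int) : ∀ a b : Int,
    (pvLoopR r (pvD2 a b) (pvD2 ((pvOdds r).length : Int) ((pvEvens r).length : Int)) (-1)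
        = pvD2 (a + pvHorner 0 (pvOdds r)) (b + pvHorner 0 (pvEvens r)))
    ∧ (pvLoopR r (pvD2 a b) (pvD2 ((pvEvens r).length : Int) ((pvOdds r).length : Int)) 1
        = pvD2 (a + pvHorner 0 (pvEvens r)) (b + pvHorner 0 (pvOdds r))) := by
  induction r with
  | nil => intro a b; simp [pvLoopR, pvEvens, pvOdds, pvHorner]
  | cons x r ih =>
    intro a b
    have hE : pvEvens (x :: r) = x :: pvOdds r := rfl
    have hO : pvOdds (x :: r) = pvEvens r := rfl
    have hH : ∀ s : List Int, pvHorner 0 (x :: s) = x * 10 ^ s.length + pvHorner 0 s := by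
      intro s
      show pvHorner (0 * 10 + x) s = _
      rw [pvHorner_shift]
      ring_nf
    constructor
    · rw [pvLoopR, hE, hO]
      rw [pvGetD_neg, pvModify_neg, pvModify_neg]
      simp only [List.length_cons]
      have h1 : (((pvOdds r).length + 1 : Nat) : Int) - 1 = ((pvOdds r).length : Int) := by
        push_cast; ring
      rw [h1]
      have h2 : (((pvOdds r).length : Int)).toNat = (pvOdds r).length := Int.toNat_natCast _
      rw [h2]
      have hidx : (-1 : Int) * -1 = 1 := by norm_num
      rw [hidx]
      rw [(ih a (b + x * 10 ^ (pvOdds r).length)).2]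
      rw [hH (pvOdds r)]
      have : b + x * 10 ^ (pvOdds r).length + pvHorner 0 (pvOdds r)
          = b + (x * 10 ^ (pvOdds r).length + pvHorner 0 (pvOdds r)) := by ring
      rw [this]
    · rw [pvLoopR, hE, hO]
      rw [pvGetD_pos, pvModify_pos, pvModify_pos]
      simp only [List.length_cons]
      have h1 : (((pvOdds r).length + 1 : Nat) : Int) - 1 = ((pvOdds r).length : Int) := by
        push_cast; ring
      rw [h1, Int.toNat_natCast]
      have hidx : (1 : Int) * -1 = -1 := by norm_num
      rw [hidx]
      rw [(ih (a + x * 10 ^ (pvOdds r).length) b).1]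
      rw [hH (pvOdds r)]
      have : a + x * 10 ^ (pvOdds r).length + pvHorner 0 (pvOdds r)
          = a + (x * 10 ^ (pvOdds r).length + pvHorner 0 (pvOdds r)) := by ring
      rw [this]
    

lemma pvSplit_eq (l : List Int) :
    l.foldl (fun (st : List Int × List Int) d => (d :: st.2, st.1)) ([], [])
      = (pvEvens l.reverse, pvOdds l.reverse) := by
  induction l using List.reverseRecOn with
  | nil => simp [pvEvens, pvOdds]
  | append_singleton l x ih =>
    rw [List.foldl_append, ih]
    simp [List.reverse_append, pvEvens, pvOdds]

-- ===== VERDICT (by name: the statement is the Claim_ definition above) =====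
theorem get_two_max_sums_spec : Claim_equal_get_two_max_sums := by
  intro lst _
  show get_two_max_sums lst = get_two_max_sums_alt lst
  unfold get_two_max_sums get_two_max_sums_alt
  rw [pvSplit_eq]
  have hodd : PySem.Int.floordiv ((lst.length : Int)) 2 = ((pvOdds lst.reverse).length : Int) := by
    rw [(pvEvensOdds_length lst.reverse).2, List.length_reverse]
    exact_mod_cast PySem.Int.floordiv_natCast lst.length 2
  have heven : (lst.length : Int) - ((pvOdds lst.reverse).length : Int)
      = ((pvEvens lst.reverse).length : Int) := by
    rw [(pvEvensOdds_length lst.reverse).1, (pvEvensOdds_length lst.reverse).2,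
      List.length_reverse]
    omega
  have hfold : ∀ a b : Int, ((PySem.Dict.empty.insert (1 : Int) a).insert (-1) b) = pvD2 a b :=
    fun _ _ => rfl
  simp only [PySem.List.len_eq, hodd, heven, hfold]
  rw [pvLoopA_eq_loopR lst lst.length le_rfl, List.take_length]
  rw [(pvLoopR_key lst.reverse 0 0).1, pvGetD_pos, pvGetD_neg]
  simp
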